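-- pv_equiv track=rewrite | github.com/danielocandes/Proyecto-3-Dalgo | testspython.py | construir_verticales
-- ===== SOURCE A (Python) =====
-- import bisect
--
-- def construir_verticales(coordsX, horizontales):
--     verticales = {}
--
--     keysHorizontales = sorted(horizontales.keys())
--
--     for cx in coordsX:
--         verticales[cx] = []
--         focosEnCol = sorted(coordsX[cx])
--
--         start = focosEnCol[0]
--         i = 1
--
--         while i < len(focosEnCol):
--             y_objetivo = focosEnCol[i]
--             bloqueo = primer_bloqueo_vertical(cx, start, y_objetivo,
--                                               horizontales,
--                                               keysHorizontales,
--                                               coordsX)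
--
--             if bloqueo is None:
--                 i += 1
--             else:
--                 # cerrar línea hasta el foco previo
--                 linea = (start, focosEnCol[i-1])
--                 verticales[cx].append(linea)
--
--                 # nueva línea desde este foco
--                 start = focosEnCol[i]
--                 i += 1
--
--         # cerrar la última
--         verticales[cx].append((start, focosEnCol[-1]))
--
--     return verticales
--
-- def primer_bloqueo_vertical(x, y1, y2, horizontales, keysHorizontales, coordsX):
--     start = bisect.bisect_left(keysHorizontales, y1)
--
--     for idx in range(start, len(keysHorizontales)):
--         y = keysHorizontales[idx]
--         if y > y2:
--             break
--
--         for (x1, x2) in horizontales[y]: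
--             if x1 <= x <= x2:
--                 if y not in coordsX[x]:   # intersección prohibida
--                     return y
--     return None
-- ===== SOURCE B (Python) =====
-- import bisect
--
-- def construir_verticales(coordsX, horizontales):
--     cols = sorted(coordsX)
--     # inverted index: sweep the horizontals once, appending each height y (in ascending
--     # order) to every column it covers; dedup within one height by checking the last entry
--     bloq = {x: [] for x in cols}
--     for y in sorted(horizontales):
--         for x1, x2 in horizontales[y]:
--             for x in cols[bisect.bisect_left(cols, x1):bisect.bisect_right(cols, x2)]:
--                 lx = bloq[x]
--                 if not lx or lx[-1] != y:
--                     lx.append(y)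
--     resultado = {}
--     for x, ys in coordsX.items():
--         yset = set(ys)
--         # blocking heights for this column: covered heights that carry no focus
--         bloqueos = [y for y in bloq[x] if y not in yset]
--         # group the sorted foci by their rank = number of blockages below them;
--         # each group is one maximal vertical segment (its min and max focus)
--         grupos = {}
--         j = 0
--         for f in sorted(ys):
--             while j < len(bloqueos) and bloqueos[j] < f:
--                 j += 1
--             if j in grupos:
--                 lo, _ = grupos[j]
--                 grupos[j] = (lo, f)
--             else:
--                 grupos[j] = (f, f)
--         resultado[x] = list(grupos.values())
--     return resultado
-- ===== Notes on version B (the rewrite author's own statement) =====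
-- stated objective: faster
-- what changed: A grows each segment and, for every next focus, rescans the sorted horizontal keys from the segment start with a per-gap blockage query; B sweeps the horizontals once into an inverted index (for each covered column, its ascending list of blocking heights, found by bisecting the sorted column list per interval) and then groups each column's sorted foci by their rank among those heights with a single forward pointer, reading each segment off as the min/max of its rank group — no blockage query ever runs inside the foci loop.
import Mathlib
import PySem

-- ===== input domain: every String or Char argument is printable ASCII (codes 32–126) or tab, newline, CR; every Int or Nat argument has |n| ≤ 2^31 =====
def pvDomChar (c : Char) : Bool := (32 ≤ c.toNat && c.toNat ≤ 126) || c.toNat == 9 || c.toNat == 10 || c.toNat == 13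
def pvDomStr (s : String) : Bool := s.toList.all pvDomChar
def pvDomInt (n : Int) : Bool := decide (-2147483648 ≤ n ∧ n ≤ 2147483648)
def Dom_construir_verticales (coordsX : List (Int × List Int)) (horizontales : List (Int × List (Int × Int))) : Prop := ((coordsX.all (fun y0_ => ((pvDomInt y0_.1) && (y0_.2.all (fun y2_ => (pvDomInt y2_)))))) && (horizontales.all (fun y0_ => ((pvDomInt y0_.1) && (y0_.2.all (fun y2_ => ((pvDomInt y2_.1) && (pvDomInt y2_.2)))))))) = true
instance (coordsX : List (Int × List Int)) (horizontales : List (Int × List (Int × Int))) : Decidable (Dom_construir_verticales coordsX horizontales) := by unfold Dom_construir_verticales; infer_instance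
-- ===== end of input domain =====

-- B replaces A's per-gap rescan of the horizontals by a per-column precomputed blocker list and a
-- rank-grouping of the sorted foci (group = number of blockers below); objective: a faster algorithm.


-- ===== PORT A =====
-- the `for idx in range(start, len(keysHorizontales))` scan of primer_bloqueo_vertical (break on
-- y > y2; inner `for (x1, x2) in horizontales[y]` with its two nested ifs as `List.any`);
-- ys = coordsX[x]
def pvScanA (x y2 : Int) (hd : PySem.Dict Int (List (Int × Int))) (ys : List Int) : List Int → Option Int
  | [] => none
  | y :: rest =>
    if y2 < y then none
    else if (hd.getD y []).any (fun q => (decide (q.1 ≤ x) && decide (x ≤ q.2)) && !(ys.contains y)) then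
      some y
    else pvScanA x y2 hd ys rest

-- primer_bloqueo_vertical(x, y1, y2, horizontales, keysHorizontales, coordsX)
def pvBloqueoA (x y1 y2 : Int) (hd : PySem.Dict Int (List (Int × Int))) (keysH ys : List Int) : Option Int :=
  pvScanA x y2 hd ys (keysH.drop (PySem.List.bisectLeft keysH y1))

-- A's while loop over the sorted foci of one column; prev = focosEnCol[i-1]
def pvLoopA (x : Int) (hd : PySem.Dict Int (List (Int × Int))) (keysH ys : List Int) :
    Int → Int → List Int → List (Int × Int) → List (Int × Int)
  | start, prev, [], acc => acc ++ [(start, prev)]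
  | start, prev, y :: rest, acc =>
    match pvBloqueoA x start y hd keysH ys with
    | none => pvLoopA x hd keysH ys start y rest acc
    | some _ => pvLoopA x hd keysH ys y y rest (acc ++ [(start, prev)])

-- one column of A: focosEnCol = sorted(coordsX[cx]); the while loop; plus the final append
def pvColA (x : Int) (ysx : List Int) (hd : PySem.Dict Int (List (Int × Int))) (keysH : List Int) : List (Int × Int) :=
  match PySem.List.sorted ysx (fun y => y) false with
  | [] => []   -- focosEnCol[0] raises IndexError here: excluded by Pre_
  | f0 :: rest => pvLoopA x hd keysH ysx f0 f0 rest []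

def construir_verticales (coordsX : List (Int × List Int)) (horizontales : List (Int × List (Int × Int))) : List (Int × List (Int × Int)) :=
  ((PySem.Dict.ofList coordsX : PySem.Dict Int (List Int)).items.foldl
    (fun (vd : PySem.Dict Int (List (Int × Int))) p =>
      vd.insert p.1
        (pvColA p.1 ((PySem.Dict.ofList coordsX : PySem.Dict Int (List Int)).getD p.1 [])
          (PySem.Dict.ofList horizontales)
          (PySem.List.sorted (PySem.Dict.ofList horizontales : PySem.Dict Int (List (Int × Int))).keys (fun y => y) false)))
    PySem.Dict.empty).items

-- ===== PORT B =====
-- `lx = bloq[x]; if not lx or lx[-1] != y: lx.append(y)` — the in-place conditional append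
def pvDedup (y : Int) (lx : List Int) : List Int :=
  if lx.isEmpty ∨ PySem.List.pyGet? lx (-1) ≠ some y then lx ++ [y] else lx

-- `for x in cols[bisect_left(cols, x1):bisect_right(cols, x2)]: …` — one horizontal interval
-- swept over the columns it covers; the in-place list mutation of bloq[x] is Dict.modify
def pvSweepTramo (y x1 x2 : Int) (cols : List Int) (d : PySem.Dict Int (List Int)) : PySem.Dict Int (List Int) :=
  (PySem.List.slice cols (some (PySem.List.bisectLeft cols x1 : Int))
      (some (PySem.List.bisectRight cols x2 : Int))).foldl
    (fun d x => d.modify x [] (pvDedup y)) d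

-- `bloq = {x: [] for x in cols}` then the `for y in sorted(horizontales)` sweep
def pvSweep (cols : List Int) (hd : PySem.Dict Int (List (Int × Int))) (keysH : List Int) : PySem.Dict Int (List Int) :=
  keysH.foldl (fun d y => (hd.getD y []).foldl (fun d q => pvSweepTramo y q.1 q.2 cols d) d)
    (cols.foldl (fun d x => d.insert x ([] : List Int)) PySem.Dict.empty)

-- the `while j < len(bloqueos) and bloqueos[j] < f: j += 1` pointer advance
def pvAdvance (bl : List Int) (f : Int) : Nat → Nat → Nat
  | 0, j => j   -- fuel only guards termination: fuel = bl.length steps always suffice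
  | fuel + 1, j =>
    if h : j < bl.length then
      if bl[j] < f then pvAdvance bl f fuel (j + 1) else j
    else j

-- Source B's `for f in sorted(ys)` grouping loop over state (j, grupos); `lo, _ = grupos[j]` is a
-- lookup guarded by `j in grupos`, so the total getD with a dummy default is exact there
def pvAgrupar (bl : List Int) : List Int → Nat → PySem.Dict Nat (Int × Int) → PySem.Dict Nat (Int × Int)
  | [], _, g => g
  | f :: rest, j, g =>
    let j' := pvAdvance bl f bl.length j
    if g.contains j' then
      pvAgrupar bl rest j' (g.insert j' ((g.getD j' (0, 0)).1, f))
    else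
      pvAgrupar bl rest j' (g.insert j' (f, f))

-- one column of B: `bloqueos = [y for y in bloq[x] if y not in yset]`, the grouping loop,
-- then list(grupos.values()); bloqx is bloq[x]
def pvColB (ysx bloqx : List Int) : List (Int × Int) :=
  (pvAgrupar (bloqx.filter (fun y => !(PySem.Set.contains (PySem.Set.ofList ysx) y)))
    (PySem.List.sorted ysx (fun y => y) false) 0 PySem.Dict.empty).values

-- cols = sorted(coordsX); the sweep; then the `for x, ys in coordsX.items()` loop building resultado
def construir_verticales_alt (coordsX : List (Int × List Int)) (horizontales : List (Int × List (Int × Int))) : List (Int × List (Int × Int)) :=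
  ((PySem.Dict.ofList coordsX : PySem.Dict Int (List Int)).items.foldl
    (fun (rd : PySem.Dict Int (List (Int × Int))) p =>
      rd.insert p.1
        (pvColB p.2
          ((pvSweep
              (PySem.List.sorted (PySem.Dict.ofList coordsX : PySem.Dict Int (List Int)).keys (fun y => y) false)
              (PySem.Dict.ofList horizontales)
              (PySem.List.sorted (PySem.Dict.ofList horizontales : PySem.Dict Int (List (Int × Int))).keys (fun y => y) false)).getD p.1 [])))
    PySem.Dict.empty).items

-- ===== PRECONDITION & SPEC =====
-- Pre_ excludes only inputs on which A raises: a column of the coordsX dict whose list of foci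
-- is empty makes `focosEnCol[0]` raise IndexError.
def Pre_construir_verticales (coordsX : List (Int × List Int)) (horizontales : List (Int × List (Int × Int))) : Prop :=
  ∀ p ∈ (PySem.Dict.ofList coordsX : PySem.Dict Int (List Int)).items, p.2 ≠ []
instance (coordsX : List (Int × List Int)) (horizontales : List (Int × List (Int × Int))) : Decidable (Pre_construir_verticales coordsX horizontales) := by unfold Pre_construir_verticales; infer_instance

def pvWitness_construir_verticales : (List (Int × List Int)) × (List (Int × List (Int × Int))) :=
  ([(0, [0, 2]), (1, [3])], [(1, [(0, 5)])])

def Spec_construir_verticales (coordsX : List (Int × List Int)) (horizontales : List (Int × List (Int × Int))) (out : List (Int × List (Int × Int))) : Prop := out = construir_verticales_alt coordsX horizontales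
instance (coordsX : List (Int × List Int)) (horizontales : List (Int × List (Int × Int))) (out : List (Int × List (Int × Int))) : Decidable (Spec_construir_verticales coordsX horizontales out) := by unfold Spec_construir_verticales; infer_instance

-- ===== CLAIM (what is proved, stated in full; the proofs are below) =====
def Claim_equal_construir_verticales : Prop := ∀ (coordsX : List (Int × List Int)) (horizontales : List (Int × List (Int × Int))), Dom_construir_verticales coordsX horizontales → Pre_construir_verticales coordsX horizontales → Spec_construir_verticales coordsX horizontales (construir_verticales coordsX horizontales)
-- ===== LEMMAS AND PROOFS =====

-- the common "y is a blocking horizontal for column x" test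
def pvHit (x : Int) (hd : PySem.Dict Int (List (Int × Int))) (ys : List Int) (y : Int) : Bool :=
  !(ys.contains y) && (hd.getD y []).any (fun q => decide (q.1 ≤ x) && decide (x ≤ q.2))

-- "some horizontal blocks column x strictly inside, at height a ≤ y ≤ b"
def pvBlk (x : Int) (hd : PySem.Dict Int (List (Int × Int))) (keysH ys : List Int) (a b : Int) : Bool :=
  keysH.any (fun y => decide (a ≤ y) && decide (y ≤ b) && pvHit x hd ys y)

theorem pv_any_and_const (l : List (Int × Int)) (g : Int × Int → Bool) (k : Bool) :
    l.any (fun q => g q && k) = (l.any g && k) := by cases k <;> simp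

theorem pvScanA_suffix (x b : Int) (hd : PySem.Dict Int (List (Int × Int))) (ys : List Int)
    (a : Int) (m : List Int) (hpw : m.Pairwise (· ≤ ·)) (hlo : ∀ y ∈ m, a ≤ y) :
    (pvScanA x b hd ys m = none) ↔
      m.any (fun y => decide (a ≤ y) && decide (y ≤ b) && pvHit x hd ys y) = false := by
  induction m with
  | nil => simp [pvScanA]
  | cons y rest ih =>
    have hay : a ≤ y := hlo y (by simp)
    by_cases hb : b < y
    · have hrest : ∀ z ∈ rest, ¬ z ≤ b := by
        intro z hz
        have := List.rel_of_pairwise_cons hpw hz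
        omega
      simp only [pvScanA, if_pos hb, List.any_cons]
      rw [List.any_eq_false.2 (by intro z hz; simp [hrest z hz])]
      simp; omega
    · push Not at hb
      have hcov : (hd.getD y []).any (fun q => (decide (q.1 ≤ x) && decide (x ≤ q.2)) && !(ys.contains y))
          = pvHit x hd ys y := by
        rw [pv_any_and_const, pvHit, Bool.and_comm]
      simp only [pvScanA, if_neg (by omega : ¬ b < y), hcov, List.any_cons]
      cases hh : pvHit x hd ys y
      · simp only [Bool.false_eq_true, if_false]
        rw [ih hpw.of_cons (fun z hz => hlo z (by simp [hz]))]
        simp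
      · simp [hay, hb]

theorem pv_take_drop_bisect (keysH : List Int) (a : Int) (hpw : keysH.Pairwise (· ≤ ·)) :
    (∀ y ∈ keysH.take (PySem.List.bisectLeft keysH a), y < a) ∧
    (∀ y ∈ keysH.drop (PySem.List.bisectLeft keysH a), a ≤ y) := by
  obtain ⟨hle, hlt, hge⟩ := PySem.List.bisectLeft_spec keysH a hpw
  constructor
  · intro y hy
    obtain ⟨j, hj, rfl⟩ := List.mem_iff_getElem.1 hy
    rw [List.getElem_take]
    exact hlt j (by simp at hj; omega) (by simp at hj; omega)
  · intro y hy
    obtain ⟨j, hj, rfl⟩ := List.mem_iff_getElem.1 hy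
    rw [List.getElem_drop]
    exact hge _ (by simp at hj; omega) (by omega)

theorem pvBloqueoA_spec (x a b : Int) (hd : PySem.Dict Int (List (Int × Int))) (keysH ys : List Int)
    (hpw : keysH.Pairwise (· ≤ ·)) :
    (pvBloqueoA x a b hd keysH ys = none) ↔ pvBlk x hd keysH ys a b = false := by
  obtain ⟨hpre, hsuf⟩ := pv_take_drop_bisect keysH a hpw
  rw [pvBloqueoA, pvScanA_suffix x b hd ys a _ (hpw.drop) hsuf]
  unfold pvBlk
  conv_rhs => rw [← List.take_append_drop (PySem.List.bisectLeft keysH a) keysH]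
  rw [List.any_append]
  have : (keysH.take (PySem.List.bisectLeft keysH a)).any
      (fun y => decide (a ≤ y) && decide (y ≤ b) && pvHit x hd ys y) = false := by
    rw [List.any_eq_false]
    intro z hz
    have := hpre z hz
    simp; omega
  rw [this, Bool.false_or]

-- window shift: once [start, prev] is known clean, scanning [start, b] and [prev, b] agree
theorem pvBlk_shift (x : Int) (hd : PySem.Dict Int (List (Int × Int))) (keysH ys : List Int)
    {start prev : Int} (b : Int) (hsp : start ≤ prev)
    (hclean : pvBlk x hd keysH ys start prev = false) :
    pvBlk x hd keysH ys start b = pvBlk x hd keysH ys prev b := by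
  rw [pvBlk, List.any_eq_false] at hclean
  rw [Bool.eq_iff_iff]
  simp only [pvBlk, List.any_eq_true, Bool.and_eq_true, decide_eq_true_eq]
  constructor
  · rintro ⟨w, hw, ⟨h1, h2⟩, h3⟩
    refine ⟨w, hw, ⟨?_, h2⟩, h3⟩
    by_contra hwp
    have := hclean w hw
    simp [h3] at this
    omega
  · rintro ⟨w, hw, ⟨h1, h2⟩, h3⟩
    exact ⟨w, hw, ⟨by omega, h2⟩, h3⟩

theorem pvBlk_self (x : Int) (hd : PySem.Dict Int (List (Int × Int))) (keysH ys : List Int)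
    {y : Int} (hy : y ∈ ys) : pvBlk x hd keysH ys y y = false := by
  rw [pvBlk, List.any_eq_false]
  intro z hz
  simp only [Bool.and_eq_true, decide_eq_true_eq, not_and, and_imp]
  intro h1 h2
  have : z = y := le_antisymm h2 h1
  subst this
  simp [pvHit, hy]

-- a hit is never a focus
theorem pv_hit_not_mem (x : Int) (hd : PySem.Dict Int (List (Int × Int))) (ys : List Int) {k : Int}
    (hk : pvHit x hd ys k = true) : ys.contains k = false := by
  rw [pvHit] at hk
  simp only [Bool.and_eq_true, Bool.not_eq_eq_eq_not, Bool.not_true] at hk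
  exact hk.1

-- the membership test against set(ys) in the comprehension is list membership
theorem pv_contains_ofList (ys : List Int) (y : Int) :
    PySem.Set.contains (PySem.Set.ofList ys) y = ys.contains y := by
  simp only [PySem.Set.contains]
  rw [Bool.eq_iff_iff]
  simp [PySem.Set.mem_ofList]

-- ---- the sweep: bloq[x] ends up as the ascending covered heights of column x ----

-- "some interval of height y covers column x"
def pvCover (hd : PySem.Dict Int (List (Int × Int))) (x y : Int) : Bool :=
  (hd.getD y []).any (fun q => decide (q.1 ≤ x) && decide (x ≤ q.2))

theorem pvDedup_getLast (y : Int) (lx : List Int) :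
    PySem.List.pyGet? (pvDedup y lx) (-1) = some y := by
  unfold pvDedup
  split_ifs with h
  · exact PySem.List.pyGet?_neg_one_append_singleton lx y
  · push Not at h
    exact h.2

theorem pvDedup_ne_nil (y : Int) (lx : List Int) : pvDedup y lx ≠ [] := by
  unfold pvDedup
  split_ifs with h
  · simp
  · push Not at h
    simpa [List.isEmpty_iff] using h.1

theorem pvDedup_idem (y : Int) (lx : List Int) : pvDedup y (pvDedup y lx) = pvDedup y lx := by
  have h1 := pvDedup_getLast y lx
  have h2 : pvDedup y lx ≠ [] := pvDedup_ne_nil y lx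
  conv_lhs => rw [pvDedup]
  rw [if_neg (by
    rintro (hc | hc)
    · exact h2 (List.isEmpty_iff.1 hc)
    · exact hc h1)]

-- a fresh height appends: the last entry (an earlier height) is never y
theorem pvDedup_append (y : Int) (lx : List Int) (h : y ∉ lx) : pvDedup y lx = lx ++ [y] := by
  have hcond : lx.isEmpty ∨ PySem.List.pyGet? lx (-1) ≠ some y := by
    rcases eq_or_ne lx [] with hnil | hne
    · left; simp [hnil]
    · right
      have hget : PySem.List.pyGet? lx (-1) = some (lx.getLast hne) := by
        conv_lhs => rw [← List.dropLast_append_getLast hne]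
        rw [PySem.List.pyGet?_neg_one_append_singleton]
      rw [hget]
      intro hcon
      apply h
      have hm := List.getLast_mem hne
      rwa [Option.some_inj.1 hcon] at hm
  unfold pvDedup
  rw [if_pos hcond]

-- the modify-fold of one swept interval, read back at any column
theorem pv_foldl_modify_getD (y : Int) :
    ∀ (xs : List Int) (d : PySem.Dict Int (List Int)) (x : Int),
      ((xs.foldl (fun d x' => d.modify x' [] (pvDedup y)) d).getD x [])
        = if x ∈ xs then pvDedup y (d.getD x []) else d.getD x [] := by
  intro xs
  induction xs with
  | nil => intro d x; simp
  | cons a l ih =>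
    intro d x
    rw [List.foldl_cons, ih]
    by_cases hxa : x = a
    · subst hxa
      rw [PySem.Dict.getD_modify, if_pos rfl]
      by_cases hmem : x ∈ l
      · rw [if_pos hmem, pvDedup_idem, if_pos (by simp)]
      · rw [if_neg hmem, if_pos (by simp)]
    · rw [PySem.Dict.getD_modify, if_neg hxa]
      by_cases hmem : x ∈ l
      · rw [if_pos hmem, if_pos (by simp [hmem])]
      · rw [if_neg hmem, if_neg (by simp [hxa, hmem])]

-- membership in the bisected slice of the sorted column list
theorem pv_mem_slice_iff (cols : List Int) (hs : cols.Pairwise (· ≤ ·)) (x1 x2 x : Int) :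
    x ∈ PySem.List.slice cols (some (PySem.List.bisectLeft cols x1 : Int))
        (some (PySem.List.bisectRight cols x2 : Int))
      ↔ x ∈ cols ∧ x1 ≤ x ∧ x ≤ x2 := by
  obtain ⟨hL1, hL2, hL3⟩ := PySem.List.bisectLeft_spec cols x1 hs
  obtain ⟨hR1, hR2, hR3⟩ := PySem.List.bisectRight_spec cols x2 hs
  rw [PySem.List.slice_natCast]
  constructor
  · intro hx
    obtain ⟨i, hi, rfl⟩ := List.getElem_of_mem hx
    have hlen : i < (cols.drop (PySem.List.bisectLeft cols x1)).length := by
      have := hi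
      simp only [List.length_take, List.length_drop] at this ⊢
      omega
    rw [List.getElem_take, List.getElem_drop]
    simp only [List.length_take, List.length_drop] at hi
    have hidx : PySem.List.bisectLeft cols x1 + i < cols.length := by
      simp only [List.length_drop] at hlen; omega
    refine ⟨List.getElem_mem hidx, ?_, ?_⟩
    · exact hL3 _ hidx (by omega)
    · exact hR2 _ hidx (by omega)
  · rintro ⟨hmem, h1, h2⟩
    obtain ⟨i, hi, rfl⟩ := List.getElem_of_mem hmem
    have hge : PySem.List.bisectLeft cols x1 ≤ i := by
      by_contra hcon
      have := hL2 i hi (by omega)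
      omega
    have hlt : i < PySem.List.bisectRight cols x2 := by
      by_contra hcon
      have := hR3 i hi (by omega)
      omega
    rw [List.mem_iff_getElem]
    refine ⟨i - PySem.List.bisectLeft cols x1, ?_, ?_⟩
    · simp only [List.length_take, List.length_drop]
      omega
    · rw [List.getElem_take, List.getElem_drop]
      congr 1
      omega

-- one interval of height y, read back at any column
theorem pvSweepTramo_getD (y x1 x2 : Int) (cols : List Int) (hs : cols.Pairwise (· ≤ ·))
    (d : PySem.Dict Int (List Int)) (x : Int) :
    (pvSweepTramo y x1 x2 cols d).getD x []
      = if x ∈ cols ∧ x1 ≤ x ∧ x ≤ x2 then pvDedup y (d.getD x []) else d.getD x [] := by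
  rw [pvSweepTramo, pv_foldl_modify_getD]
  by_cases h : x ∈ cols ∧ x1 ≤ x ∧ x ≤ x2
  · rw [if_pos ((pv_mem_slice_iff cols hs x1 x2 x).2 h), if_pos h]
  · rw [if_neg (fun hc => h ((pv_mem_slice_iff cols hs x1 x2 x).1 hc)), if_neg h]

-- all intervals of height y, read back at any column
theorem pv_trs_fold_getD (y : Int) (cols : List Int) (hs : cols.Pairwise (· ≤ ·)) :
    ∀ (trs : List (Int × Int)) (d : PySem.Dict Int (List Int)) (x : Int),
      ((trs.foldl (fun d q => pvSweepTramo y q.1 q.2 cols d) d).getD x [])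
        = if x ∈ cols ∧ trs.any (fun q => decide (q.1 ≤ x) && decide (x ≤ q.2)) = true
            then pvDedup y (d.getD x []) else d.getD x [] := by
  intro trs
  induction trs with
  | nil => intro d x; simp
  | cons q l ih =>
    intro d x
    rw [List.foldl_cons, ih, pvSweepTramo_getD y q.1 q.2 cols hs]
    by_cases hmem : x ∈ cols
    · by_cases hq : q.1 ≤ x ∧ x ≤ q.2
      · by_cases hl : (l.any fun t => decide (t.1 ≤ x) && decide (x ≤ t.2)) = true
        · simp [List.any_cons, hmem, hq.1, hq.2, hl, pvDedup_idem]
        · simp [List.any_cons, hmem, hq.1, hq.2, hl]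
      · have hqd : (decide (q.1 ≤ x) && decide (x ≤ q.2)) = false := by
          rcases not_and_or.1 hq with h | h <;> simp [h]
        by_cases hl : (l.any fun t => decide (t.1 ≤ x) && decide (x ≤ t.2)) = true
        · simp [List.any_cons, hmem, hq, hqd, hl]
        · simp [List.any_cons, hmem, hq, hqd, hl]
    · simp [hmem]

-- the full sweep over the (distinct) heights, read back at a column
theorem pv_sweep_fold_getD (cols : List Int) (hs : cols.Pairwise (· ≤ ·))
    (hd : PySem.Dict Int (List (Int × Int))) :
    ∀ (ks : List Int) (d : PySem.Dict Int (List Int)) (x : Int), x ∈ cols → ks.Nodup →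
      (∀ z ∈ d.getD x [], z ∉ ks) →
      ((ks.foldl (fun d y => (hd.getD y []).foldl (fun d q => pvSweepTramo y q.1 q.2 cols d) d) d).getD x [])
        = d.getD x [] ++ ks.filter (fun y => pvCover hd x y) := by
  intro ks
  induction ks with
  | nil => intro d x _ _ _; simp
  | cons y rest ih =>
    intro d x hx hnd hdisj
    rw [List.foldl_cons]
    have hstep := pv_trs_fold_getD y cols hs (hd.getD y []) d x
    by_cases hcov : pvCover hd x y = true
    · rw [if_pos ⟨hx, hcov⟩] at hstep
      have happ : pvDedup y (d.getD x []) = d.getD x [] ++ [y] :=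
        pvDedup_append y _ (fun hmem => hdisj y hmem (by simp))
      rw [ih _ x hx hnd.of_cons (by
        intro z hz hzr
        rw [hstep, happ] at hz
        rcases List.mem_append.1 hz with hz1 | hz1
        · exact hdisj z hz1 (by simp [hzr])
        · simp at hz1
          subst hz1
          exact (List.nodup_cons.1 hnd).1 hzr), hstep, happ]
      rw [List.filter_cons_of_pos hcov]
      simp
    · rw [if_neg (by rintro ⟨_, hc⟩; exact hcov hc)] at hstep
      rw [ih _ x hx hnd.of_cons (by
        intro z hz hzr
        rw [hstep] at hz
        exact hdisj z hz (by simp [hzr])), hstep]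
      rw [List.filter_cons_of_neg (by simpa using hcov)]

-- the column prefill `bloq = {x: [] for x in cols}` reads back as [] everywhere
theorem pv_prefill_getD (xs : List Int) (x : Int) :
    ((xs.foldl (fun d x' => d.insert x' ([] : List Int)) PySem.Dict.empty).getD x []) = [] := by
  suffices h : ∀ (d : PySem.Dict Int (List Int)), (∀ z, d.getD z [] = []) →
      ((xs.foldl (fun d x' => d.insert x' ([] : List Int)) d).getD x []) = [] by
    exact h PySem.Dict.empty (fun z => by simp)
  induction xs with
  | nil => intro d hd; simpa using hd x
  | cons a l ih =>
    intro d hd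
    rw [List.foldl_cons]
    exact ih _ (fun z => by rw [PySem.Dict.getD_insert]; split_ifs <;> simp [hd z])

-- what the sweep leaves at column x
theorem pv_sweep_getD (cols : List Int) (hs : cols.Pairwise (· ≤ ·))
    (hd : PySem.Dict Int (List (Int × Int))) (keysH : List Int) (x : Int)
    (hx : x ∈ cols) (hnd : keysH.Nodup) :
    (pvSweep cols hd keysH).getD x [] = keysH.filter (fun y => pvCover hd x y) := by
  rw [pvSweep, pv_sweep_fold_getD cols hs hd keysH _ x hx hnd
    (by intro z hz; rw [pv_prefill_getD] at hz; cases hz), pv_prefill_getD]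
  rfl

-- what the pointer advance guarantees (all five facts at once); fuel ≥ bl.length - j
-- what the pointer advance guarantees (all five facts at once); fuel ≥ bl.length - j
theorem pvAdvance_post_aux (bl : List Int) (f : Int) :
    ∀ (fuel j : Nat), bl.length - j ≤ fuel → j ≤ bl.length →
    (∀ i (h : i < bl.length), i < j → bl[i] < f) →
    j ≤ pvAdvance bl f fuel j ∧ pvAdvance bl f fuel j ≤ bl.length ∧
    (∀ i (h : i < bl.length), i < pvAdvance bl f fuel j → bl[i] < f) ∧
    (∀ h : pvAdvance bl f fuel j < bl.length, f ≤ bl[pvAdvance bl f fuel j]) ∧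
    (pvAdvance bl f fuel j = j ∨ (∃ h : j < bl.length, bl[j] < f)) := by
  intro fuel
  induction fuel with
  | zero =>
    intro j hfuel hj hbelow
    have hP : pvAdvance bl f 0 j = j := rfl
    simp only [hP]
    refine ⟨le_refl j, hj, hbelow, ?_, Or.inl (by simp)⟩
    intro h; omega
  | succ fuel ih =>
    intro j hfuel hj hbelow
    by_cases hlt : j < bl.length
    · by_cases hbf : bl[j] < f
      · have hstep : pvAdvance bl f (fuel + 1) j = pvAdvance bl f fuel (j + 1) := by
          simp [pvAdvance, hlt, hbf]
        obtain ⟨h1, h2, h3, h4, _⟩ := ih (j + 1) (by omega) (by omega)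
          (by intro i hi hij
              by_cases hcase : i < j
              · exact hbelow i hi hcase
              · have : i = j := by omega
                subst this; exact hbf)
        simp only [hstep]
        exact ⟨by omega, h2, h3, h4, Or.inr ⟨hlt, hbf⟩⟩
      · have hstep : pvAdvance bl f (fuel + 1) j = j := by
          simp [pvAdvance, hlt, hbf]
        simp only [hstep]
        refine ⟨le_refl j, by omega, hbelow, ?_, Or.inl (by simp)⟩
        intro h; omega
    · have hstep : pvAdvance bl f (fuel + 1) j = j := by
        simp [pvAdvance, hlt]
      simp only [hstep]
      refine ⟨le_refl j, by omega, hbelow, ?_, Or.inl (by simp)⟩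
      intro h; omega

theorem pvAdvance_post (bl : List Int) (f : Int) (j : Nat)
    (hj : j ≤ bl.length) (hbelow : ∀ i (h : i < bl.length), i < j → bl[i] < f) :
    j ≤ pvAdvance bl f bl.length j ∧ pvAdvance bl f bl.length j ≤ bl.length ∧
    (∀ i (h : i < bl.length), i < pvAdvance bl f bl.length j → bl[i] < f) ∧
    (∀ h : pvAdvance bl f bl.length j < bl.length, f ≤ bl[pvAdvance bl f bl.length j]) ∧
    (pvAdvance bl f bl.length j = j ∨ (∃ h : j < bl.length, bl[j] < f)) :=
  pvAdvance_post_aux bl f bl.length j (by omega) hj hbelow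

-- the pointer stays put exactly when the gap [prev, f] holds no blocker; bl is any sorted list
-- containing exactly the hits of keysH inside some window that covers [prev, f]
theorem pvAdvance_stay_iff (x : Int) (hd : PySem.Dict Int (List (Int × Int))) (keysH ys : List Int)
    (bl : List Int) (hblsorted : bl.Pairwise (· ≤ ·))
    (hblmem : ∀ k ∈ bl, k ∈ keysH ∧ pvHit x hd ys k = true)
    (prev f : Int) (j : Nat) (hpf : prev ≤ f)
    (hcov : ∀ k ∈ keysH, pvHit x hd ys k = true → prev ≤ k → k ≤ f → k ∈ bl)
    (hf : f ∈ ys)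
    (hj : j ≤ bl.length)
    (hbelow : ∀ i (h : i < bl.length), i < j → bl[i] < prev)
    (hat : ∀ h : j < bl.length, prev ≤ bl[j]) :
    (pvAdvance bl f bl.length j = j) ↔ pvBlk x hd keysH ys prev f = false := by
  have hbelow' : ∀ i (h : i < bl.length), i < j → bl[i] < f := by
    intro i hi hij
    have h1 := hbelow i hi hij
    omega
  obtain ⟨h1, h2, h3, h4, h5⟩ := pvAdvance_post bl f j hj hbelow'
  constructor
  · intro heq
    rw [pvBlk, List.any_eq_false]
    rintro k hkkeys
    simp only [Bool.and_eq_true, decide_eq_true_eq, not_and, and_imp]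
    intro hk1 hk2 hhit
    have hkbl : k ∈ bl := hcov k hkkeys hhit hk1 hk2
    obtain ⟨i, hi, rfl⟩ := List.getElem_of_mem hkbl
    by_cases hcase : i < j
    · have := hbelow i hi hcase; omega
    · have hjlt : j < bl.length := by omega
      have hfle : f ≤ bl[j] := by
        have h' := h4 (by omega)
        simpa [heq] using h'
      have hmono : bl[j] ≤ bl[i] := by
        rcases Nat.lt_or_ge j i with hji | hji
        · exact List.pairwise_iff_getElem.1 hblsorted j i hjlt hi hji
        · have : i = j := by omega
          subst this; exact le_refl _
      have hkf : bl[i] = f := by omega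
      have hcontains : ys.contains (bl[i]) = false :=
        pv_hit_not_mem x hd ys (hblmem _ (List.getElem_mem hi)).2
      rw [hkf, List.contains_eq_mem] at hcontains
      simp [hf] at hcontains
  · intro hnone
    rcases h5 with heq | ⟨hlt, hbf⟩
    · exact heq
    · exfalso
      have hple : prev ≤ bl[j] := hat hlt
      obtain ⟨hmemk, hhit⟩ := hblmem bl[j] (List.getElem_mem hlt)
      rw [pvBlk, List.any_eq_false] at hnone
      have := hnone (bl[j]) hmemk
      simp only [Bool.and_eq_true, decide_eq_true_eq, not_and, and_imp] at this
      have := this (by omega) (by omega)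
      rw [hhit] at this
      exact this rfl

-- keys of the prefix are below the last key
theorem pv_keys_lt_last (L : List (Nat × (Int × Int))) (j : Nat) (v : Int × Int)
    (h : ((L ++ [(j, v)]).map Prod.fst).Pairwise (· < ·)) :
    ∀ k ∈ L.map Prod.fst, k < j := by
  rw [List.map_append] at h
  have := (List.pairwise_append.1 h).2.2
  intro k hk
  exact this k hk j (by simp)

-- main loop correspondence: pvAgrupar's dict state tracks pvLoopA's (acc, start, prev);
-- bl is any sorted list holding exactly the hits of keysH
theorem pvAgrupar_eq_loopA (x : Int) (hd : PySem.Dict Int (List (Int × Int))) (keysH ys : List Int)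
    (hks : keysH.Pairwise (· ≤ ·)) (bl : List Int)
    (hblsorted : bl.Pairwise (· ≤ ·))
    (hblmem : ∀ k ∈ bl, k ∈ keysH ∧ pvHit x hd ys k = true)
    (hcov : ∀ k ∈ keysH, pvHit x hd ys k = true → k ∈ bl) :
    ∀ (rest : List Int) (j : Nat) (g : PySem.Dict Nat (Int × Int)) (L : List (Nat × (Int × Int)))
      (start prev : Int),
      g.items = L ++ [(j, (start, prev))] →
      ((L ++ [(j, (start, prev))]).map Prod.fst).Pairwise (· < ·) →
      List.Pairwise (· ≤ ·) (prev :: rest) → start ≤ prev →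
      (∀ z ∈ rest, z ∈ ys) → prev ∈ ys →
      pvBlk x hd keysH ys start prev = false →
      j ≤ bl.length →
      (∀ i (h : i < bl.length), i < j → bl[i] < prev) →
      (∀ h : j < bl.length, prev ≤ bl[j]) →
      (pvAgrupar bl rest j g).values = pvLoopA x hd keysH ys start prev rest (L.map Prod.snd) := by
  intro rest
  induction rest with
  | nil =>
    intro j g L start prev hitems _ _ _ _ _ _ _ _ _
    simp only [pvAgrupar, pvLoopA, PySem.Dict.values, hitems, List.map_append, List.map_cons,
      List.map_nil]
  | cons f rest ih =>
    intro j g L start prev hitems hkeys hord hsp hmem hprevmem hclean hj hbelow hat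
    have hpf : prev ≤ f := List.rel_of_pairwise_cons hord (by simp)
    have hfmem : f ∈ ys := hmem f (by simp)
    have hkeynd : g.keys.Nodup := by
      have : (g.items.map Prod.fst).Nodup := by
        rw [hitems]
        exact (hkeys.imp fun h => Nat.ne_of_lt h)
      exact this
    have hbelow' : ∀ i (h : i < bl.length), i < j → bl[i] < f := by
      intro i hi hij; have := hbelow i hi hij; omega
    obtain ⟨p1, p2, p3, p4, _⟩ := pvAdvance_post bl f j hj hbelow'
    have hstay := pvAdvance_stay_iff x hd keysH ys bl hblsorted hblmem prev f j hpf
      (fun k hk hhit _ _ => hcov k hk hhit) hfmem hj hbelow hat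
    have hshift : pvBlk x hd keysH ys start f = pvBlk x hd keysH ys prev f :=
      pvBlk_shift x hd keysH ys f hsp hclean
    have hAspec := pvBloqueoA_spec x start f hd keysH ys hks
    have hLlt : ∀ k ∈ L.map Prod.fst, k < j := pv_keys_lt_last L j (start, prev) hkeys
    cases hblk : pvBlk x hd keysH ys prev f
    · -- no blocker in the gap: pointer stays, A extends the segment
      have hjj : pvAdvance bl f bl.length j = j := hstay.2 hblk
      have hnoneA : pvBloqueoA x start f hd keysH ys = none := by
        rw [hAspec, hshift, hblk]
      have hcontains : g.contains j = true := by
        rw [PySem.Dict.contains_eq_decide_mem_keys]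
        simp only [PySem.Dict.keys, hitems, List.map_append, decide_eq_true_eq]
        simp
      have hgetD : g.getD j (0, 0) = (start, prev) :=
        PySem.Dict.getD_of_mem_items _ (by rw [hitems]; simp) hkeynd (0, 0)
      have hitems' : (g.insert j (start, f)).items = L ++ [(j, (start, f))] := by
        rw [PySem.Dict.items_insert_of_contains g (start, f) hcontains, hitems, List.map_append]
        congr 1
        · conv_rhs => rw [← List.map_id L]
          apply List.map_congr_left
          intro p hp
          have hplt : p.1 < j := hLlt p.1 (List.mem_map_of_mem hp)
          simp [Nat.ne_of_lt hplt]
        · simp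
      simp only [pvAgrupar, hjj, hcontains, if_true, hgetD, pvLoopA, hnoneA]
      exact ih j (g.insert j (start, f)) L start f hitems'
        (by simpa using hkeys) hord.of_cons (by omega)
        (fun z hz => hmem z (by simp [hz])) hfmem (hshift ▸ hblk) hj hbelow'
        (fun h => by have h' := p4 (by omega); simpa [hjj] using h')
    · -- a blocker splits here: pointer advances, A closes the segment
      have hjj : pvAdvance bl f bl.length j ≠ j := by
        intro h
        have h0 := hstay.1 h
        rw [h0] at hblk
        exact Bool.false_ne_true hblk
      have hsomeA : ∃ w, pvBloqueoA x start f hd keysH ys = some w := by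
        cases hv : pvBloqueoA x start f hd keysH ys with
        | none => rw [hAspec, hshift, hblk] at hv; exact absurd hv (by simp)
        | some w => exact ⟨w, rfl⟩
      obtain ⟨w, hw⟩ := hsomeA
      set j' := pvAdvance bl f bl.length j with hj'
      have hjlt : j < j' := by omega
      have hcontains : g.contains j' = false := by
        rw [PySem.Dict.contains_eq_decide_mem_keys]
        simp only [PySem.Dict.keys, hitems, List.map_append, decide_eq_false_iff_not]
        intro hmem'
        rcases List.mem_append.1 hmem' with hin | hin
        · have := hLlt j' hin; omega
        · simp at hin; omega
      have hitems' : (g.insert j' (f, f)).items = (L ++ [(j, (start, prev))]) ++ [(j', (f, f))] := by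
        rw [PySem.Dict.items_insert_of_not_contains g (f, f) hcontains, hitems]
      have hkeys' : (((L ++ [(j, (start, prev))]) ++ [(j', (f, f))]).map Prod.fst).Pairwise (· < ·) := by
        rw [List.map_append, List.pairwise_append]
        refine ⟨hkeys, by simp, ?_⟩
        intro a ha b hb
        simp only [List.map_cons, List.map_nil, List.mem_singleton] at hb
        subst hb
        rw [List.map_append] at ha
        rcases List.mem_append.1 ha with hin | hin
        · have := hLlt a hin; omega
        · simp at hin; omega
      simp only [pvAgrupar, ← hj', hcontains, Bool.false_eq_true, if_false, pvLoopA, hw]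
      rw [ih j' (g.insert j' (f, f)) (L ++ [(j, (start, prev))]) f f hitems' hkeys'
        hord.of_cons (le_refl f) (fun z hz => hmem z (by simp [hz])) hfmem
        (pvBlk_self x hd keysH ys hfmem) p2 p3 p4]
      simp

-- one column of A equals one column of B (fed the sweep's entry for that column)
theorem pvCol_eq (x : Int) (ysx : List Int) (hd : PySem.Dict Int (List (Int × Int)))
    (keysH cols : List Int) (hks : keysH.Pairwise (· ≤ ·)) (hnd : keysH.Nodup)
    (hcols : cols.Pairwise (· ≤ ·)) (hx : x ∈ cols) :
    pvColA x ysx hd keysH = pvColB ysx ((pvSweep cols hd keysH).getD x []) := by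
  unfold pvColA pvColB
  rw [pv_sweep_getD cols hcols hd keysH x hx hnd]
  have hblfilter : (keysH.filter (fun y => pvCover hd x y)).filter
      (fun y => !(PySem.Set.contains (PySem.Set.ofList ysx) y)) = keysH.filter (pvHit x hd ysx) := by
    rw [List.filter_filter]
    apply List.filter_congr
    intro y _
    rw [pv_contains_ofList, pvHit, pvCover]
  rw [hblfilter]
  cases hs : PySem.List.sorted ysx (fun y => y) false with
  | nil => rfl
  | cons f0 rest =>
    have hpw : List.Pairwise (· ≤ ·) (f0 :: rest) := by
      have := PySem.List.sorted_pairwise ysx (fun y => y)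
      rw [hs] at this
      exact this
    have hmem : ∀ z ∈ f0 :: rest, z ∈ ysx := by
      intro z hz
      have : z ∈ PySem.List.sorted ysx (fun y => y) false := by rw [hs]; exact hz
      exact (PySem.List.mem_sorted ysx _ false z).1 this
    have hf0 : f0 ∈ ysx := hmem f0 (by simp)
    set bl := keysH.filter (pvHit x hd ysx) with hbl
    have hblsorted : bl.Pairwise (· ≤ ·) :=
      List.Pairwise.sublist List.filter_sublist hks
    have hblmem : ∀ k ∈ bl, k ∈ keysH ∧ pvHit x hd ysx k = true := by
      intro k hk
      exact ⟨List.filter_sublist.mem hk, List.of_mem_filter hk⟩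
    have hcov : ∀ k ∈ keysH, pvHit x hd ysx k = true → k ∈ bl := by
      intro k hkmem hhit
      exact List.mem_filter.2 ⟨hkmem, hhit⟩
    obtain ⟨p1, p2, p3, p4, _⟩ := pvAdvance_post bl f0 0 (by omega) (by intro i hi3 hij; omega)
    have hcontains : (PySem.Dict.empty : PySem.Dict Nat (Int × Int)).contains
        (pvAdvance bl f0 bl.length 0) = false :=
      PySem.Dict.contains_empty _
    have hitems0 : ((PySem.Dict.empty : PySem.Dict Nat (Int × Int)).insert
          (pvAdvance bl f0 bl.length 0) (f0, f0)).items
        = [] ++ [(pvAdvance bl f0 bl.length 0, (f0, f0))] := by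
      rw [PySem.Dict.items_insert_of_not_contains PySem.Dict.empty (f0, f0) hcontains]
      rfl
    have hstep : pvAgrupar bl (f0 :: rest) 0 PySem.Dict.empty
        = pvAgrupar bl rest (pvAdvance bl f0 bl.length 0)
            (PySem.Dict.empty.insert (pvAdvance bl f0 bl.length 0) (f0, f0)) := by
      simp only [pvAgrupar, hcontains, Bool.false_eq_true, if_false]
    have key : (pvAgrupar bl (f0 :: rest) 0 PySem.Dict.empty).values
        = pvLoopA x hd keysH ysx f0 f0 rest [] := by
      rw [hstep, pvAgrupar_eq_loopA x hd keysH ysx hks bl hblsorted hblmem hcov rest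
        (pvAdvance bl f0 bl.length 0) _ [] f0 f0 hitems0 (by simp) hpw (le_refl f0)
        (fun z hz => hmem z (by simp [hz])) hf0
        (pvBlk_self x hd keysH ysx hf0) p2 p3 p4]
      rfl
    exact key.symm

-- ===== VERDICT (by name: the statement is the Claim_ definition above) =====
theorem construir_verticales_spec : Claim_equal_construir_verticales := by
  intro coordsX horizontales _ hpre
  unfold Spec_construir_verticales construir_verticales construir_verticales_alt
  have hnd : (PySem.Dict.ofList coordsX : PySem.Dict Int (List Int)).keys.Nodup :=
    PySem.Dict.nodup_keys_ofList coordsX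
  have hks : (PySem.List.sorted (PySem.Dict.ofList horizontales : PySem.Dict Int (List (Int × Int))).keys (fun y => y) false).Pairwise (· ≤ ·) :=
    PySem.List.sorted_pairwise _ (fun y => y)
  have hknd : (PySem.List.sorted (PySem.Dict.ofList horizontales : PySem.Dict Int (List (Int × Int))).keys (fun y => y) false).Nodup :=
    ((PySem.List.sorted_perm (PySem.Dict.ofList horizontales : PySem.Dict Int (List (Int × Int))).keys (fun y => y) false).nodup_iff).2
      (PySem.Dict.nodup_keys_ofList horizontales)
  have hcols : (PySem.List.sorted (PySem.Dict.ofList coordsX : PySem.Dict Int (List Int)).keys (fun y => y) false).Pairwise (· ≤ ·) :=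
    PySem.List.sorted_pairwise _ (fun y => y)
  rw [PySem.Dict.items_foldl_insert_fresh
      (PySem.Dict.ofList coordsX : PySem.Dict Int (List Int)).items (fun p => p.1)
      (fun p => pvColA p.1 ((PySem.Dict.ofList coordsX : PySem.Dict Int (List Int)).getD p.1 [])
        (PySem.Dict.ofList horizontales)
        (PySem.List.sorted (PySem.Dict.ofList horizontales : PySem.Dict Int (List (Int × Int))).keys (fun y => y) false))
      PySem.Dict.empty (by intro a _; simp) hnd,
     PySem.Dict.items_foldl_insert_fresh
      (PySem.Dict.ofList coordsX : PySem.Dict Int (List Int)).items (fun p => p.1)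
      (fun p => pvColB p.2
        ((pvSweep
            (PySem.List.sorted (PySem.Dict.ofList coordsX : PySem.Dict Int (List Int)).keys (fun y => y) false)
            (PySem.Dict.ofList horizontales)
            (PySem.List.sorted (PySem.Dict.ofList horizontales : PySem.Dict Int (List (Int × Int))).keys (fun y => y) false)).getD p.1 []))
      PySem.Dict.empty (by intro a _; simp) hnd]
  have hemp : (PySem.Dict.empty : PySem.Dict Int (List (Int × Int))).items = [] := rfl
  rw [hemp, List.nil_append, List.nil_append]
  apply List.map_congr_left
  intro p hp
  have hget : (PySem.Dict.ofList coordsX : PySem.Dict Int (List Int)).getD p.1 [] = p.2 :=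
    PySem.Dict.getD_of_mem_items _ hp hnd []
  rw [hget]
  have hx : p.1 ∈ PySem.List.sorted (PySem.Dict.ofList coordsX : PySem.Dict Int (List Int)).keys (fun y => y) false :=
    (PySem.List.mem_sorted _ _ false p.1).2 (PySem.Dict.mem_keys_of_mem_items _ hp)
  exact congrArg (Prod.mk p.1) (pvCol_eq p.1 p.2 _ _ _ hks hknd hcols hx)
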